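-- pv_equiv track=rewrite | github.com/ananyajana/practice_problems | minimum_indexed_char.py | min_indexed_char
-- ===== SOURCE A (Python) =====
-- def min_indexed_char(str1, pat):
--     temp = dict()
--     for i in range(len(pat)):
--         temp[pat[i]] = 1    # we do not check whether the key is already present because
--         # it does not matter in this problem, at the end we want all the chars to be hashed
--         # irrespective of the number of times they are hashed. The only difference could be
--         # if checking if the key is apready present takes less time than actual hashing operation
--     for i in range(len(str1)):
--         if str1[i] in temp.keys():
--             return i
--
--     return -1
-- ===== SOURCE B (Python) =====
-- def min_indexed_char(str1, pat):
--     # Inverted traversal: instead of scanning str1 and testing each char against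
--     # pat, scan pat and take the minimum first-occurrence index (str.find) in
--     # str1 over all pattern characters.
--     best = len(str1)
--     for c in pat:
--         j = str1.find(c)
--         if j != -1 and j < best:
--             best = j
--     return best if best < len(str1) else -1
-- ===== Notes on version B (the rewrite author's own statement) =====
-- stated objective: alternative
-- what changed: B inverts the traversal: instead of hashing pat and scanning str1 for the first hashed character, it loops over pat and returns the minimum str1.find(c) over pattern characters (no dict, no scan of str1's positions).
import Mathlib
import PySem

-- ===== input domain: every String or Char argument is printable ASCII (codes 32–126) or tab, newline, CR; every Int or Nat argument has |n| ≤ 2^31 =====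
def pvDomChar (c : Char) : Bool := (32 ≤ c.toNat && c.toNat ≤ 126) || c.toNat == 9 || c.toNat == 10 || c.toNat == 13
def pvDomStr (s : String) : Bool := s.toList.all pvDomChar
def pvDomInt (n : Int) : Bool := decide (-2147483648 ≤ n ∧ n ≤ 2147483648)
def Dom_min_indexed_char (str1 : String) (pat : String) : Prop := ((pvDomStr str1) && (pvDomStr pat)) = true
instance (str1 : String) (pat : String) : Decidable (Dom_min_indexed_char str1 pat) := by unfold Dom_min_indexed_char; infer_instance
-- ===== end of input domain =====

-- B inverts the traversal: it loops over pat taking the minimum str1.find(c), instead of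
-- hashing pat and scanning str1 (objective: alternative; return values proved equal).


-- ===== PORT A =====
-- second loop of A: for i in range(len(str1)): if str1[i] in temp.keys(): return i
def micLoopA (temp : PySem.Dict Char Int) : List Char → Int → Int
  | [], _ => -1
  | c :: rest, i => if temp.contains c then i else micLoopA temp rest (i + 1)

def min_indexed_char (str1 : String) (pat : String) : Int :=
  let temp := pat.toList.foldl (fun d c => d.insert c (1 : Int)) PySem.Dict.empty
  micLoopA temp str1.toList 0

-- ===== PORT B =====
-- loop body of B: j = str1.find(c); if j != -1 and j < best: best = j
def micStep (s : List Char) (b : Int) (c : Char) : Int :=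
  let j := PySem.Chars.find s [c]
  if j ≠ -1 ∧ j < b then j else b

def min_indexed_char_alt (str1 : String) (pat : String) : Int :=
  let s := str1.toList
  let best := pat.toList.foldl (micStep s) (s.length : Int)
  if best < (s.length : Int) then best else -1

-- ===== PRECONDITION & SPEC =====
def Spec_min_indexed_char (str1 : String) (pat : String) (out : Int) : Prop := out = min_indexed_char_alt str1 pat
instance (str1 : String) (pat : String) (out : Int) : Decidable (Spec_min_indexed_char str1 pat out) := by unfold Spec_min_indexed_char; infer_instance

-- ===== CLAIM (what is proved, stated in full; the proofs are below) =====
def Claim_equal_min_indexed_char : Prop := ∀ (str1 : String) (pat : String), Dom_min_indexed_char str1 pat → Spec_min_indexed_char str1 pat (min_indexed_char str1 pat)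

-- ===== LEMMAS AND PROOFS =====

-- the dict built from pat contains exactly pat's characters
theorem contains_fold_insert (l : List Char) (d : PySem.Dict Char Int) (c : Char) :
    (l.foldl (fun d c => d.insert c (1 : Int)) d).contains c = (d.contains c || l.contains c) := by
  induction l generalizing d with
  | nil => simp
  | cons x xs ih =>
      simp only [List.foldl_cons, ih, PySem.Dict.contains_insert, List.contains_cons]
      cases h : (c == x) <;> simp [Bool.or_comm]

-- `[c]` is an infix of s iff c is a member
theorem singleton_infix_iff (c : Char) (s : List Char) : [c] <:+: s ↔ c ∈ s := by
  constructor
  · intro h; exact h.subset (by simp)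
  · intro h
    obtain ⟨l1, l2, rfl⟩ := List.append_of_mem h
    exact ⟨l1, l2, by simp⟩

-- characterisation of a successful single-character find: it is the first index holding c
theorem find_char_spec (s : List Char) (c : Char)
    (h : PySem.Chars.find s [c] ≠ -1) :
    ∃ j : Nat, PySem.Chars.find s [c] = (j : Int) ∧ j < s.length ∧
      s[j]? = some c ∧ ∀ i < j, s[i]? ≠ some c := by
  have hnn : 0 ≤ PySem.Chars.find s [c] := by
    have := PySem.Chars.neg_one_le_find s [c]; omega
  obtain ⟨hpre, hmin⟩ := PySem.Chars.find_spec (s := s) (sub := [c]) hnn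
  obtain ⟨t, ht⟩ := hpre
  have hj : (PySem.Chars.find s [c]).toNat < s.length := by
    by_contra hlen
    push_neg at hlen
    simp [List.drop_eq_nil_of_le hlen] at ht
  refine ⟨(PySem.Chars.find s [c]).toNat, by omega, hj, ?_, ?_⟩
  · have : (s.drop (PySem.Chars.find s [c]).toNat)[0]? = some c := by simp [← ht]
    simpa [List.getElem?_drop] using this
  · intro i hi hic
    apply hmin i hi
    have hil : i < s.length := by
      by_contra hil; push_neg at hil; simp [List.getElem?_eq_none (by omega)] at hic
    refine ⟨s.drop (i+1), ?_⟩
    have hdrop := List.drop_eq_getElem_cons hil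
    rw [List.getElem?_eq_getElem hil] at hic
    simp only [Option.some.injEq] at hic
    simpa [hic] using hdrop.symm

-- find of a character whose first occurrence is at index k
theorem find_char_of_first (s : List Char) (c : Char) (k : Nat)
    (_hk : k < s.length) (hc : s[k]? = some c) (hmin : ∀ i < k, s[i]? ≠ some c) :
    PySem.Chars.find s [c] = (k : Int) := by
  have hne : PySem.Chars.find s [c] ≠ -1 := by
    rw [Ne, PySem.Chars.find_eq_neg_one_iff, not_not, singleton_infix_iff]
    exact List.mem_of_getElem? hc
  obtain ⟨j, hj, hjl, hjc, hjmin⟩ := find_char_spec s c hne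
  rcases lt_trichotomy j k with h | h | h
  · exact absurd hjc (hmin j h)
  · rw [hj, h]
  · exact absurd hc (hjmin k h)

-- fold lemma: if no pattern character occurs, best stays untouched
theorem fold_no_hit (s : List Char) (p : List Char) (b : Int)
    (h : ∀ c ∈ p, PySem.Chars.find s [c] = -1) :
    p.foldl (micStep s) b = b := by
  induction p generalizing b with
  | nil => rfl
  | cons c rest ih =>
      simp only [List.foldl_cons]
      rw [show micStep s b c = b by simp [micStep, h c (by simp)]]
      exact ih _ fun c hc => h c (List.mem_cons_of_mem _ hc)

-- a single step never increases best
theorem micStep_le (s : List Char) (b : Int) (c : Char) : micStep s b c ≤ b := by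
  simp only [micStep]
  split_ifs with h
  · exact le_of_lt h.2
  · exact le_rfl

-- the fold never increases best
theorem fold_le (s : List Char) (p : List Char) (b : Int) :
    p.foldl (micStep s) b ≤ b := by
  induction p generalizing b with
  | nil => exact le_rfl
  | cons c rest ih => exact le_trans (ih _) (micStep_le s b c)

-- lower bound: if k bounds b and every hit from below, it bounds the fold result
theorem fold_lb (s : List Char) (p : List Char) (b k : Int)
    (hb : k ≤ b)
    (h : ∀ c ∈ p, PySem.Chars.find s [c] ≠ -1 → k ≤ PySem.Chars.find s [c]) :
    k ≤ p.foldl (micStep s) b := by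
  induction p generalizing b with
  | nil => exact hb
  | cons c rest ih =>
      simp only [List.foldl_cons]
      refine ih _ ?_ (fun c hc => h c (List.mem_cons_of_mem _ hc))
      simp only [micStep]
      split_ifs with hif
      · exact h c (List.mem_cons_self) hif.1
      · exact hb

-- upper bound: the result is at most the find of any processed pattern character
theorem fold_ub (s : List Char) (p : List Char) (b : Int) (c0 : Char) (hc0 : c0 ∈ p)
    (k : Int) (hk : PySem.Chars.find s [c0] = k) (hkne : k ≠ -1) :
    p.foldl (micStep s) b ≤ k := by
  obtain ⟨l1, l2, rfl⟩ := List.append_of_mem hc0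
  rw [List.foldl_append, List.foldl_cons]
  refine le_trans (fold_le s l2 _) ?_
  simp only [micStep, hk]
  split_ifs with h
  · exact le_rfl
  · push_neg at h
    exact h hkne

-- A's scan returns -1 when no character of s lies in p
theorem micLoopA_eq_neg_one (p : List Char) (temp : PySem.Dict Char Int)
    (htemp : ∀ c, temp.contains c = p.contains c)
    (s : List Char) (i : Int)
    (h : ∀ c ∈ s, c ∉ p) :
    micLoopA temp s i = -1 := by
  induction s generalizing i with
  | nil => rfl
  | cons c rest ih =>
      unfold micLoopA
      rw [htemp]
      rw [show p.contains c = false by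
        simp only [List.contains_eq_mem, decide_eq_false_iff_not]
        exact h c List.mem_cons_self]
      simp only [Bool.false_eq_true, if_false]
      exact ih _ fun c hc => h c (List.mem_cons_of_mem _ hc)

-- A's scan returns the start offset plus the first index whose character lies in p
theorem micLoopA_eq_hit (p : List Char) (temp : PySem.Dict Char Int)
    (htemp : ∀ c, temp.contains c = p.contains c)
    (s : List Char) (k : Nat) (i : Int)
    (hk : k < s.length) (hc : ∀ c, s[k]? = some c → c ∈ p)
    (hmin : ∀ j < k, ∀ c, s[j]? = some c → c ∉ p) :
    micLoopA temp s i = i + (k : Int) := by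
  induction s generalizing k i with
  | nil => simp at hk
  | cons c rest ih =>
      unfold micLoopA
      rw [htemp]
      cases k with
      | zero =>
          have : c ∈ p := hc c (by simp)
          rw [show p.contains c = true by simpa [List.contains_eq_mem] using this]
          simp
      | succ k' =>
          have hcp : c ∉ p := hmin 0 (Nat.succ_pos _) c (by simp)
          rw [show p.contains c = false by simpa [List.contains_eq_mem] using hcp]
          simp only [Bool.false_eq_true, if_false]
          rw [ih k' (i + 1) (by simpa using hk)
            (fun d hd => hc d (by simpa using hd))
            (fun j hj d hd => hmin (j+1) (by omega) d (by simpa using hd))]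
          push_cast
          ring

-- ===== VERDICT (by name: the statement is the Claim_ definition above) =====
theorem min_indexed_char_spec : Claim_equal_min_indexed_char := by
  intro str1 pat _
  unfold Spec_min_indexed_char min_indexed_char min_indexed_char_alt
  set s := str1.toList with hs
  set p := pat.toList with hp
  simp only []
  have htemp : ∀ c, (p.foldl (fun d c => d.insert c (1 : Int)) PySem.Dict.empty).contains c
      = p.contains c := by
    intro c
    rw [contains_fold_insert]
    simp
  by_cases hex : ∃ k : Nat, (s[k]?.any p.contains) = true
  · -- some position of s holds a pattern character; k is the first
    classical
    set k := Nat.find hex with hkdef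
    have hk : (s[k]?.any p.contains) = true := Nat.find_spec hex
    have hmin : ∀ j < k, (s[j]?.any p.contains) = false := by
      intro j hj
      have := Nat.find_min hex hj
      simpa using this
    obtain ⟨c0, hc0s, hc0p⟩ : ∃ c0, s[k]? = some c0 ∧ c0 ∈ p := by
      cases hsk : s[k]? with
      | none => rw [hsk] at hk; simp [Option.any] at hk
      | some c0 =>
          rw [hsk] at hk
          simp only [Option.any_some, List.contains_eq_mem, decide_eq_true_eq] at hk
          exact ⟨c0, rfl, hk⟩
    have hklen : k < s.length := by
      by_contra hlen
      push_neg at hlen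
      rw [List.getElem?_eq_none hlen] at hc0s
      simp at hc0s
    have hminmem : ∀ j < k, ∀ c, s[j]? = some c → c ∉ p := by
      intro j hj c hjc hcp
      have := hmin j hj
      rw [hjc] at this
      simp only [Option.any_some, List.contains_eq_mem, decide_eq_false_iff_not] at this
      exact this hcp
    -- A returns k
    rw [micLoopA_eq_hit p _ htemp s k 0 hklen
      (fun c hcs => by rw [hc0s] at hcs; exact (Option.some.inj hcs) ▸ hc0p)
      hminmem]
    -- B's fold computes k
    have hfind : PySem.Chars.find s [c0] = (k : Int) :=
      find_char_of_first s c0 k hklen hc0s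
        (fun i hi hic => hminmem i hi c0 hic hc0p)
    have hub : p.foldl (micStep s) (s.length : Int) ≤ (k : Int) :=
      fold_ub s p _ c0 hc0p _ hfind (by omega)
    have hlb : (k : Int) ≤ p.foldl (micStep s) (s.length : Int) := by
      refine fold_lb s p _ _ (by exact_mod_cast hklen.le) ?_
      intro c hcp hcne
      obtain ⟨j, hjeq, hjl, hjc, _⟩ := find_char_spec s c hcne
      rw [hjeq]
      have : ¬ j < k := fun hjk => hminmem j hjk c hjc hcp
      omega
    have hbest : p.foldl (micStep s) (s.length : Int) = (k : Int) := le_antisymm hub hlb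
    rw [hbest, if_pos (by exact_mod_cast hklen)]
    omega
  · -- no position of s holds a pattern character
    push_neg at hex
    rw [micLoopA_eq_neg_one p _ htemp s 0 ?memh]
    case memh =>
      intro c hcs hcp
      obtain ⟨j, hj, hjc⟩ := List.mem_iff_getElem.mp hcs
      have := hex j
      rw [List.getElem?_eq_getElem hj, hjc] at this
      simp only [Option.any_some, List.contains_eq_mem] at this
      simp at this
      exact this hcp
    rw [fold_no_hit s p _ ?findh]
    case findh =>
      intro c hcp
      by_contra hcne
      obtain ⟨j, _, hjl, hjc, _⟩ := find_char_spec s c hcne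
      have := hex j
      rw [hjc] at this
      simp only [Option.any_some, List.contains_eq_mem] at this
      simp at this
      exact this hcp
    simp
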